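-- pv_equiv track=rewrite | github.com/Ayan1520/DSA | dsa in python/subset_sum.py | solve
-- ===== SOURCE A (Python) =====
-- def solve(ind,nums,total,result):
--     if ind >= len(nums):
--         result.append(total)
--         return
--     sum=total+nums[ind]
--     solve(ind+1,nums,sum,result)
--     sum=total
--     solve(ind+1,nums,sum,result)
--     return result
-- ===== SOURCE B (Python) =====
-- def solve(ind, nums, total, result):
--     if ind >= len(nums):
--         result.append(total)
--         return
--     cur = [total]
--     for x in reversed(nums[ind:]):
--         cur = [x + c for c in cur] + cur
--     result.extend(cur)
--     return result
-- ===== Notes on version B (the rewrite author's own statement) =====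
-- stated objective: alternative
-- what changed: Replaces the binary include/exclude recursion by a single iterative pass that folds the suffix nums[ind:] in reverse into a running list of partial subset sums (cur = [x+c for c in cur] + cur), reproducing the DFS include-first order without recursion.
-- outside the precondition, e.g. on solve(-1, [5], 0, []): A returns [10, 5, 5, 0], B returns [5, 0]; on solve(1, [], 0, []): A returns None, B returns None
import Mathlib
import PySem

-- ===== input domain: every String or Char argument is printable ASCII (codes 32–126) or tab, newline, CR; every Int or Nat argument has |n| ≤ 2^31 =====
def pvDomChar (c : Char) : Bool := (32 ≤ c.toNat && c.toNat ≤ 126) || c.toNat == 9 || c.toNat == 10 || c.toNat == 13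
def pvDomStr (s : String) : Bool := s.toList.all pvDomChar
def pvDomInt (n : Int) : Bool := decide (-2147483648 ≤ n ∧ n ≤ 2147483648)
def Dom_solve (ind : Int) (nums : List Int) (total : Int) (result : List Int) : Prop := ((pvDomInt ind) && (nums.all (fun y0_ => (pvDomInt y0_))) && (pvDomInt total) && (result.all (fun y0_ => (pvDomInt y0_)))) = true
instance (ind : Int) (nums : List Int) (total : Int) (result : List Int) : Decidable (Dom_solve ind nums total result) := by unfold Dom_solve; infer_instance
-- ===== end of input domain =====

-- B replaces the include/exclude recursion by one iterative reverse fold over nums[ind:]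
-- maintaining the list of partial subset sums (same DFS order); equivalence of RETURN values
-- is proved (both Pythons also append the same sums to `result` in place).


-- ===== PORT A =====
-- Literal port of A. Python mutates `result` in place; the port threads it through the
-- recursive calls. The top-level base case (ind ≥ len) returns None in Python and the
-- out-of-range index ind < -len raises IndexError; both are excluded by Pre_solve.
def solve (ind : Int) (nums : List Int) (total : Int) (result : List Int) : List Int :=
  if _h : ind ≥ (nums.length : Int) then result ++ [total]
  else
    match PySem.List.pyGet? nums ind with
    | none => result   -- IndexError in Python (ind < -len); outside Pre_solve
    | some v => solve (ind + 1) nums total (solve (ind + 1) nums (total + v) result)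
termination_by ((nums.length : Int) - ind).toNat
decreasing_by all_goals omega

-- ===== PORT B =====
def solve_alt (ind : Int) (nums : List Int) (total : Int) (result : List Int) : List Int :=
  if ind ≥ (nums.length : Int) then result ++ [total]
  else
    let cur := ((PySem.List.slice nums (some ind) none).reverse).foldl
      (fun c x => c.map (fun y => x + y) ++ c) [total]
    result ++ cur

-- ===== PRECONDITION & SPEC =====
-- Pre_ restricts ind to the natural domain 0 ≤ ind < len(nums) of a recursion index:
-- for ind ≥ len(nums) A returns None (not a list), and negative ind is outside the
-- natural starting domain (Python's negative indexing applies there).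
def Pre_solve (ind : Int) (nums : List Int) (total : Int) (result : List Int) : Prop :=
  0 ≤ ind ∧ ind < (nums.length : Int)
instance (ind : Int) (nums : List Int) (total : Int) (result : List Int) : Decidable (Pre_solve ind nums total result) := by unfold Pre_solve; infer_instance

def pvWitness_solve : Int × List Int × Int × List Int := (0, [1, 2, 3], 0, [7])

def Spec_solve (ind : Int) (nums : List Int) (total : Int) (result : List Int) (out : List Int) : Prop := out = solve_alt ind nums total result
instance (ind : Int) (nums : List Int) (total : Int) (result : List Int) (out : List Int) : Decidable (Spec_solve ind nums total result out) := by unfold Spec_solve; infer_instance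

-- ===== CLAIM (what is proved, stated in full; the proofs are below) =====
def Claim_equal_solve : Prop := ∀ (ind : Int) (nums : List Int) (total : Int) (result : List Int), Dom_solve ind nums total result → Pre_solve ind nums total result → Spec_solve ind nums total result (solve ind nums total result)

-- ===== LEMMAS AND PROOFS =====

-- DFS include-first subset sums of a list, shifted by t.
def dfsSums : List Int → Int → List Int
  | [], t => [t]
  | x :: l, t => dfsSums l (t + x) ++ dfsSums l t

theorem map_dfsSums (l : List Int) : ∀ (t x : Int),
    (dfsSums l t).map (fun y => x + y) = dfsSums l (x + t) := by
  induction l with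
  | nil => intro t x; simp [dfsSums]
  | cons a l ih =>
    intro t x
    simp only [dfsSums, List.map_append, ih]
    have : x + (t + a) = x + t + a := by ring
    rw [this]

theorem foldl_dfsSums (l : List Int) : ∀ (t : Int),
    l.reverse.foldl (fun c x => c.map (fun y => x + y) ++ c) [t] = dfsSums l t := by
  induction l with
  | nil => intro t; simp [dfsSums]
  | cons a l ih =>
    intro t
    simp only [List.reverse_cons, List.foldl_append, List.foldl_cons, List.foldl_nil, ih,
      map_dfsSums, dfsSums]
    rw [Int.add_comm a t]

theorem solve_closed (nums : List Int) : ∀ (n : Nat) (ind : Int) (total : Int) (result : List Int),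
    0 ≤ ind → ((nums.length : Int) - ind).toNat = n →
    solve ind nums total result = result ++ dfsSums (nums.drop ind.toNat) total := by
  intro n
  induction n with
  | zero =>
    intro ind total result h0 hn
    have hge : ind ≥ (nums.length : Int) := by omega
    have hd : nums.drop ind.toNat = [] := by
      apply List.drop_eq_nil_of_le; omega
    rw [solve]
    simp [hge, hd, dfsSums]
  | succ n ih =>
    intro ind total result h0 hn
    have hlt : ind < (nums.length : Int) := by omega
    have hlt' : ind.toNat < nums.length := by omega
    have hget : PySem.List.pyGet? nums ind = some nums[ind.toNat] :=
      PySem.List.pyGet?_eq_some_getElem nums h0 hlt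
    have hd : nums.drop ind.toNat = nums[ind.toNat] :: nums.drop (ind.toNat + 1) :=
      List.drop_eq_getElem_cons hlt'
    have ht : (ind + 1).toNat = ind.toNat + 1 := by omega
    rw [solve]
    simp only [not_le.mpr hlt, dite_eq_ite, hget]
    rw [ih (ind + 1) (total + nums[ind.toNat]) result (by omega) (by omega),
        ih (ind + 1) total _ (by omega) (by omega), ht, hd]
    simp [dfsSums]

-- ===== VERDICT (by name: the statement is the Claim_ definition above) =====
theorem solve_spec : Claim_equal_solve := by
  intro ind nums total result _hdom hpre
  obtain ⟨h0, hlt⟩ := hpre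
  unfold Spec_solve solve_alt
  rw [if_neg (not_le.mpr hlt)]
  simp only [PySem.List.slice_from nums h0, foldl_dfsSums]
  exact solve_closed nums _ ind total result h0 rfl
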